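-- pv_equiv track=rewrite | github.com/roeinath/Magdad | web_features/tech_miun/report_survey.py | format_link
-- ===== SOURCE A (Python) =====
-- def format_link(link):
--     FIELD_DIC = {
--         "ESTIMATOR_NAME": "<ESTIMATOR_NAME>",
--         "MALSHAB_NAME": "<MALSHAB_NAME>",
--         "%D7%90": "<TEAM_NUMBER>",
--         "MALSHAB_SERIAL_NUMBER": "<MALSHAB_SERIAL_NUMBER>",
--         "ESTIMATOR_MAIL": "<ESTIMATOR_MAIL>"
--     }
--     for key in FIELD_DIC.keys():
--         link = link.replace(key, FIELD_DIC[key])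
--
--     return link
-- ===== SOURCE B (Python) =====
-- FIELDS = [
--     ("ESTIMATOR_NAME", "<ESTIMATOR_NAME>"),
--     ("MALSHAB_NAME", "<MALSHAB_NAME>"),
--     ("%D7%90", "<TEAM_NUMBER>"),
--     ("MALSHAB_SERIAL_NUMBER", "<MALSHAB_SERIAL_NUMBER>"),
--     ("ESTIMATOR_MAIL", "<ESTIMATOR_MAIL>"),
-- ]
--
--
-- def format_link(link):
--     # Single left-to-right scan: at each position try to match one of the
--     # placeholder keys; on a match emit its replacement and jump past it,
--     # otherwise emit the character.  One pass instead of five replace passes.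
--     out = []
--     i = 0
--     n = len(link)
--     while i < n:
--         for key, val in FIELDS:
--             if link.startswith(key, i):
--                 out.append(val)
--                 i += len(key)
--                 break
--         else:
--             out.append(link[i])
--             i += 1
--     return "".join(out)
-- ===== Notes on version B (the rewrite author's own statement) =====
-- stated objective: alternative
-- what changed: B replaces all five placeholder keys in ONE left-to-right scan of the string (match a key at the cursor, emit its value, jump past it; else emit the char), instead of A's five sequential full str.replace passes; Pre_ excludes links containing two overlapping occurrences of distinct keys, where the winner is an accident of A's pass order vs the scan order and neither choice is specified.
import Mathlib
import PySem

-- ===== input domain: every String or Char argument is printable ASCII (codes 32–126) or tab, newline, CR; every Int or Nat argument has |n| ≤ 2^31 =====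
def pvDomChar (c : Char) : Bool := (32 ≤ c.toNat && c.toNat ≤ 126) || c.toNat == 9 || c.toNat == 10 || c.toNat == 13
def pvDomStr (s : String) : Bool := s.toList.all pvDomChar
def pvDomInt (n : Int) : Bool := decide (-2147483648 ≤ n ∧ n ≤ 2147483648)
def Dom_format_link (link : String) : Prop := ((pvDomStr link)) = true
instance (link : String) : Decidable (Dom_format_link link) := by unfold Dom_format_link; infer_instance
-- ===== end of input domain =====

-- B replaces all five placeholder keys in one left-to-right scan instead of five sequential replace passes;
-- Pre_ excludes links with overlapping occurrences of distinct keys, where the two strategies legitimately disagree.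

-- ===== PORT A =====
-- FIELD_DIC, in insertion order
def pvFieldDic : PySem.Dict String String :=
  PySem.Dict.mk
  [("ESTIMATOR_NAME", "<ESTIMATOR_NAME>"),
   ("MALSHAB_NAME", "<MALSHAB_NAME>"),
   ("%D7%90", "<TEAM_NUMBER>"),
   ("MALSHAB_SERIAL_NUMBER", "<MALSHAB_SERIAL_NUMBER>"),
   ("ESTIMATOR_MAIL", "<ESTIMATOR_MAIL>")]

-- for key in FIELD_DIC.keys(): link = link.replace(key, FIELD_DIC[key])
-- (every iterated key is a key of the dict, so the getD default "" is never used)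
def format_link (link : String) : String :=
  (PySem.Dict.keys pvFieldDic).foldl
    (fun l key => PySem.Str.replace l key (PySem.Dict.getD pvFieldDic key "")) link

-- ===== PORT B =====
-- the FIELDS pair table of Source B, as char lists
def pvPairs : List (List Char × List Char) :=
  [("ESTIMATOR_NAME".toList, "<ESTIMATOR_NAME>".toList),
   ("MALSHAB_NAME".toList, "<MALSHAB_NAME>".toList),
   ("%D7%90".toList, "<TEAM_NUMBER>".toList),
   ("MALSHAB_SERIAL_NUMBER".toList, "<MALSHAB_SERIAL_NUMBER>".toList),
   ("ESTIMATOR_MAIL".toList, "<ESTIMATOR_MAIL>".toList)]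

-- the inner `for key, val in FIELDS: if link.startswith(key, i): … break`
def pvTry (s : List Char) : Option (List Char × List Char) :=
  pvPairs.findSome? (fun kv => if kv.1.isPrefixOf s then some kv else none)

-- the `while i < n` scan, as fueled recursion on the remaining characters
def pvScan : Nat → List Char → List Char
  | 0, l => l
  | _+1, [] => []
  | fuel+1, c :: t =>
      match pvTry (c :: t) with
      | some kv => kv.2 ++ pvScan fuel (List.drop kv.1.length (c :: t))
      | none => c :: pvScan fuel t

def format_link_alt (link : String) : String :=
  String.ofList (pvScan link.toList.length link.toList)

-- ===== PRECONDITION & SPEC =====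
-- Pre_ excludes links containing two overlapping occurrences of DISTINCT placeholder keys: there A's
-- sequential passes and B's left-to-right scan pick different winners and neither choice is specified.
def Pre_format_link (link : String) : Prop :=
  ∀ kv1 ∈ pvPairs, ∀ kv2 ∈ pvPairs, kv1.1 ≠ kv2.1 →
    ∀ i ∈ List.range link.toList.length, ∀ j ∈ List.range link.toList.length,
      kv1.1.isPrefixOf (link.toList.drop i) = true → kv2.1.isPrefixOf (link.toList.drop j) = true →
      i + kv1.1.length ≤ j ∨ j + kv2.1.length ≤ i
instance (link : String) : Decidable (Pre_format_link link) := by unfold Pre_format_link; infer_instance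

def pvWitness_format_link : String := "x=ESTIMATOR_NAME"

def Spec_format_link (link : String) (out : String) : Prop := out = format_link_alt link
instance (link : String) (out : String) : Decidable (Spec_format_link link out) := by unfold Spec_format_link; infer_instance

-- ===== CLAIM (what is proved, stated in full; the proofs are below) =====
def Claim_equal_format_link : Prop :=
  ∀ (link : String), Dom_format_link link → Pre_format_link link → Spec_format_link link (format_link link)

-- ===== LEMMAS AND PROOFS =====

-- ---- decidable facts about the pair table ----
theorem pvKeysNe : ∀ kv ∈ pvPairs, kv.1 ≠ [] := by decide
theorem pvKeysNoLt : ∀ kv ∈ pvPairs, '<' ∉ kv.1 := by decide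
theorem pvKeysNoGt : ∀ kv ∈ pvPairs, '>' ∉ kv.1 := by decide
theorem pvValsHead : ∀ kv ∈ pvPairs, kv.2.head? = some '<' := by decide
theorem pvValsLast : ∀ kv ∈ pvPairs, kv.2.getLast? = some '>' := by decide
theorem pvKeysNodup : (pvPairs.map (·.1)).Nodup := by decide
theorem pvNoKeyInOtherVal :
    ∀ kv ∈ pvPairs, ∀ kv2 ∈ pvPairs, kv.1 ≠ kv2.1 →
      ∀ p < kv.2.length, kv2.1.isPrefixOf (List.drop p kv.2) = false := by decide

-- ---- the spec of one replace pass (greedy left-to-right, fueled) ----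
def pvRepSpec (old new : List Char) : Nat → List Char → List Char
  | 0, l => l
  | _+1, [] => []
  | fuel+1, c :: t =>
      if old.isPrefixOf (c :: t) then new ++ pvRepSpec old new fuel (List.drop old.length (c :: t))
      else c :: pvRepSpec old new fuel t

theorem pvRepSpec_congr (old new : List Char) (h : old ≠ []) :
    ∀ f1 f2 l, l.length ≤ f1 → l.length ≤ f2 → pvRepSpec old new f1 l = pvRepSpec old new f2 l := by
  intro f1
  induction f1 with
  | zero =>
      intro f2 l h1 _
      have : l = [] := List.eq_nil_of_length_eq_zero (Nat.le_zero.mp h1)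
      subst this
      cases f2 <;> simp [pvRepSpec]
  | succ f1 ih =>
      intro f2 l h1 h2
      cases l with
      | nil => cases f2 <;> simp [pvRepSpec]
      | cons c t =>
          cases f2 with
          | zero => simp at h2
          | succ f2 =>
              simp only [pvRepSpec]
              split
              · have hd : (List.drop old.length (c :: t)).length ≤ t.length := by
                  have : 1 ≤ old.length := by
                    cases old with
                    | nil => exact absurd rfl h
                    | cons _ _ => simp
                  simp [List.length_drop]; omega
                congr 1
                exact ih f2 _ (le_trans hd (by simp at h1; omega)) (le_trans hd (by simp at h2; omega))
              · congr 1
                exact ih f2 _ (by simp at h1; omega) (by simp at h2; omega)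

theorem pvReplaceGo (old new : List Char) :
    ∀ fuel l acc, PySem.Chars.replace.go old new fuel l acc = acc.reverse ++ pvRepSpec old new fuel l := by
  intro fuel
  induction fuel with
  | zero => intro l acc; cases l <;> simp [PySem.Chars.replace.go, pvRepSpec]
  | succ fuel ih =>
      intro l acc
      cases l with
      | nil => simp [PySem.Chars.replace.go, pvRepSpec]
      | cons c t =>
          simp only [PySem.Chars.replace.go, pvRepSpec]
          split
          · rw [ih]; simp
          · rw [ih]; simp

theorem pvReplaceEq (l old new : List Char) (h : old ≠ []) :
    PySem.Chars.replace l old new = pvRepSpec old new l.length l := by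
  rw [PySem.Chars.replace, if_neg (by simpa [List.isEmpty_iff] using h), pvReplaceGo]
  simp

-- ---- A's composition of passes, over an arbitrary pair list ----
def pvFold (K : List (List Char × List Char)) (s : List Char) : List Char :=
  K.foldl (fun l kv => pvRepSpec kv.1 kv.2 l.length l) s

-- "no key occurrence starts inside the first a-part of a ++ b"
def pvBnd (k a b : List Char) : Prop :=
  ∀ p < a.length, ¬ k.isPrefixOf (List.drop p (a ++ b)) = true

-- L1: a replace pass passes an untouched prefix through
theorem pvRepPush (k v : List Char) (hk : k ≠ []) :
    ∀ a b, pvBnd k a b →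
      pvRepSpec k v (a ++ b).length (a ++ b) = a ++ pvRepSpec k v b.length b := by
  intro a
  induction a with
  | nil => intro b _; simp
  | cons c a' ih =>
      intro b hB
      have h0 : ¬ k.isPrefixOf (c :: (a' ++ b)) = true := by
        have := hB 0 (by simp)
        simpa using this
      have : pvRepSpec k v ((c :: a') ++ b).length ((c :: a') ++ b)
          = c :: pvRepSpec k v (a' ++ b).length (a' ++ b) := by
        simp only [List.cons_append, List.length_cons, pvRepSpec]
        rw [if_neg h0]
      rw [this, ih b]
      · rfl
      · intro p hp
        have := hB (p + 1) (by simp; omega)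
        simpa using this

-- L3: a pass either preserves a prefix of its input or puts '<' into it
theorem pvTakeRep (k v : List Char) (hv : v.head? = some '<') :
    ∀ fuel b q, List.take q (pvRepSpec k v fuel b) = List.take q b
      ∨ '<' ∈ List.take q (pvRepSpec k v fuel b) := by
  intro fuel
  induction fuel with
  | zero => intro b q; left; simp [pvRepSpec]
  | succ fuel ih =>
      intro b q
      cases b with
      | nil => left; simp [pvRepSpec]
      | cons c t =>
          simp only [pvRepSpec]
          split
          · cases q with
            | zero => left; simp
            | succ q' =>
                right
                cases v with
                | nil => simp at hv
                | cons v0 v' =>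
                    have : v0 = '<' := by simpa using hv
                    subst this
                    simp
          · cases q with
            | zero => left; simp
            | succ q' =>
                rcases ih t q' with h | h
                · left; simp [h]
                · right; simp [h]

-- L2: pvBnd is preserved by a replace pass on the right part
theorem pvBndPreserve (k2 k v a b : List Char)
    (h2 : '<' ∉ k2) (hv : v.head? = some '<') (hB : pvBnd k2 a b) :
    pvBnd k2 a (pvRepSpec k v b.length b) := by
  intro p hp hpre
  rw [List.drop_append_of_le_length (Nat.le_of_lt hp)] at hpre
  have hpre' := (List.isPrefixOf_iff_prefix).mp hpre
  have hu : 1 ≤ (List.drop p a).length := by simp; omega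
  by_cases hlen : k2.length ≤ (List.drop p a).length
  · -- k2 lies inside a
    have htake := List.prefix_iff_eq_take.mp hpre'
    rw [List.take_append, Nat.sub_eq_zero_of_le hlen, List.take_zero,
      List.append_nil] at htake
    apply hB p hp
    apply List.isPrefixOf_iff_prefix.mpr
    rw [List.drop_append_of_le_length (Nat.le_of_lt hp), htake]
    exact (List.take_prefix _ _).trans (List.prefix_append _ _)
  · push_neg at hlen
    have htake := List.prefix_iff_eq_take.mp hpre'
    rw [List.take_append,
      List.take_of_length_le (Nat.le_of_lt hlen)] at htake
    rcases pvTakeRep k v hv b.length b (k2.length - (List.drop p a).length) with h3 | h3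
    · apply hB p hp
      apply List.isPrefixOf_iff_prefix.mpr
      rw [List.drop_append_of_le_length (Nat.le_of_lt hp), htake, h3]
      exact (List.prefix_append_right_inj _).mpr (List.take_prefix _ _)
    · exact h2 (htake ▸ List.mem_append_right _ h3)

-- Bnd for a value prefix: no key starts inside an emitted value
theorem pvBndVal (k2 v : List Char)
    (hgt : '>' ∉ k2) (hlast : v.getLast? = some '>')
    (hin : ∀ p < v.length, k2.isPrefixOf (List.drop p v) = false) :
    ∀ Y, pvBnd k2 v Y := by
  intro Y p hp hpre
  rw [List.drop_append_of_le_length (Nat.le_of_lt hp)] at hpre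
  have hpre' := (List.isPrefixOf_iff_prefix).mp hpre
  by_cases hlen : k2.length ≤ (List.drop p v).length
  · have htake := List.prefix_iff_eq_take.mp hpre'
    rw [List.take_append, Nat.sub_eq_zero_of_le hlen, List.take_zero,
      List.append_nil] at htake
    have hisp : k2.isPrefixOf (List.drop p v) = true :=
      List.isPrefixOf_iff_prefix.mpr (htake ▸ List.take_prefix _ _)
    rw [hin p hp] at hisp
    cases hisp
  · push_neg at hlen
    -- drop p v is a nonempty prefix of k2, and it ends with '>'
    have htake := List.prefix_iff_eq_take.mp hpre'
    rw [List.take_append,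
      List.take_of_length_le (Nat.le_of_lt hlen)] at htake
    have hdpre : List.drop p v <+: k2 :=
      ⟨List.take (k2.length - (List.drop p v).length) Y, htake.symm⟩
    have hlast' : (List.drop p v).getLast? = some '>' := by
      rw [List.getLast?_drop, if_neg (by omega)]
      exact hlast
    exact hgt (hdpre.subset (List.mem_of_getLast? hlast'))

-- SEQSPLIT: all passes together pass an untouched prefix through
theorem pvSeqSplit :
    ∀ (K : List (List Char × List Char)), (∀ kv ∈ K, kv ∈ pvPairs) →
      ∀ a b, (∀ kv ∈ K, pvBnd kv.1 a b) →
        pvFold K (a ++ b) = a ++ pvFold K b := by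
  intro K
  induction K with
  | nil => intro _ a b _; simp [pvFold]
  | cons kv K' ih =>
      intro hK a b hB
      have hkv : kv ∈ pvPairs := hK kv (by simp)
      have hstep : pvRepSpec kv.1 kv.2 (a ++ b).length (a ++ b)
          = a ++ pvRepSpec kv.1 kv.2 b.length b :=
        pvRepPush kv.1 kv.2 (pvKeysNe kv hkv) a b (hB kv (by simp))
      simp only [pvFold, List.foldl_cons]
      rw [show (a ++ b).length = (a++b).length from rfl, hstep]
      have := ih (fun kv' h => hK kv' (by simp [h])) a (pvRepSpec kv.1 kv.2 b.length b)
        (fun kv' h => pvBndPreserve kv'.1 kv.1 kv.2 a b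
          (pvKeysNoLt kv' (hK kv' (by simp [h]))) (pvValsHead kv hkv) (hB kv' (by simp [h])))
      simpa [pvFold] using this

-- ---- no-overlap condition at char level, unbounded ----
def pvNoOv (s : List Char) : Prop :=
  ∀ kv1 ∈ pvPairs, ∀ kv2 ∈ pvPairs, kv1.1 ≠ kv2.1 →
    ∀ i j : Nat, kv1.1.isPrefixOf (s.drop i) = true → kv2.1.isPrefixOf (s.drop j) = true →
      i + kv1.1.length ≤ j ∨ j + kv2.1.length ≤ i

theorem pvPreNoOv (link : String) (h : Pre_format_link link) : pvNoOv link.toList := by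
  intro kv1 h1 kv2 h2 hne i j hi hj
  have hilt : i < link.toList.length := by
    by_contra hge
    push_neg at hge
    rw [List.drop_eq_nil_of_le hge] at hi
    have := pvKeysNe kv1 h1
    cases hk : kv1.1 with
    | nil => exact this hk
    | cons a t => rw [hk] at hi; simp [List.isPrefixOf] at hi
  have hjlt : j < link.toList.length := by
    by_contra hge
    push_neg at hge
    rw [List.drop_eq_nil_of_le hge] at hj
    have := pvKeysNe kv2 h2
    cases hk : kv2.1 with
    | nil => exact this hk
    | cons a t => rw [hk] at hj; simp [List.isPrefixOf] at hj
  exact h kv1 h1 kv2 h2 hne i (List.mem_range.mpr hilt) j (List.mem_range.mpr hjlt) hi hj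

theorem pvNoOvDrop (s : List Char) (m : Nat) (h : pvNoOv s) : pvNoOv (s.drop m) := by
  intro kv1 h1 kv2 h2 hne i j hi hj
  rw [List.drop_drop] at hi hj
  have := h kv1 h1 kv2 h2 hne (i + m) (j + m) (by rwa [Nat.add_comm]) (by rwa [Nat.add_comm])
  omega

-- pvTry characterisation
theorem pvTry_some (s : List Char) (kv : List Char × List Char) (h : pvTry s = some kv) :
    kv ∈ pvPairs ∧ kv.1.isPrefixOf s = true := by
  obtain ⟨a, ha, hfa⟩ := List.exists_of_findSome?_eq_some h
  by_cases hp : a.1.isPrefixOf s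
  · rw [if_pos hp] at hfa
    cases hfa
    exact ⟨ha, hp⟩
  · rw [if_neg hp] at hfa
    cases hfa

theorem pvTry_none (s : List Char) (h : pvTry s = none) :
    ∀ kv ∈ pvPairs, ¬ kv.1.isPrefixOf s = true := by
  intro kv hkv hp
  have := List.findSome?_eq_none_iff.mp h kv hkv
  rw [if_pos hp] at this
  cases this

theorem pvScan_congr :
    ∀ f1 f2 l, l.length ≤ f1 → l.length ≤ f2 → pvScan f1 l = pvScan f2 l := by
  intro f1
  induction f1 with
  | zero =>
      intro f2 l h1 _
      have : l = [] := List.eq_nil_of_length_eq_zero (Nat.le_zero.mp h1)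
      subst this
      cases f2 <;> simp [pvScan]
  | succ f1 ih =>
      intro f2 l h1 h2
      cases l with
      | nil => cases f2 <;> simp [pvScan]
      | cons c t =>
          cases f2 with
          | zero => simp at h2
          | succ f2 =>
              simp only [pvScan]
              cases htry : pvTry (c :: t) with
              | none =>
                  simp only []
                  congr 1
                  exact ih f2 t (by simp at h1; omega) (by simp at h2; omega)
              | some kv =>
                  obtain ⟨hmem, _⟩ := pvTry_some _ _ htry
                  have hk1 : 1 ≤ kv.1.length := by
                    have := pvKeysNe kv hmem
                    cases h : kv.1 with
                    | nil => exact absurd h this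
                    | cons _ _ => simp [h]
                  have hd : (List.drop kv.1.length (c :: t)).length ≤ t.length := by
                    simp [List.length_drop]; omega
                  simp only []
                  congr 1
                  exact ih f2 _ (le_trans hd (by simp at h1; omega)) (le_trans hd (by simp at h2; omega))

theorem pvFold_nil (K : List (List Char × List Char)) : pvFold K [] = [] := by
  induction K with
  | nil => rfl
  | cons kv K' ih => simpa [pvFold, pvRepSpec] using ih

-- MAIN: under no-overlap, the five sequential passes equal the single scan
theorem pvMain : ∀ n s, s.length ≤ n → pvNoOv s → pvFold pvPairs s = pvScan s.length s := by
  intro n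
  induction n with
  | zero =>
      intro s h _
      have : s = [] := List.eq_nil_of_length_eq_zero (Nat.le_zero.mp h)
      subst this
      simp [pvFold_nil, pvScan]
  | succ n ih =>
      intro s hlen hno
      cases s with
      | nil => simp [pvFold_nil, pvScan]
      | cons c t =>
          cases htry : pvTry (c :: t) with
          | none =>
              -- no key matches at position 0
              have hscan : pvScan (c :: t).length (c :: t) = c :: pvScan t.length t := by
                simp only [List.length_cons, pvScan, htry]
              have hsplit : pvFold pvPairs ((c :: []) ++ t) = (c :: []) ++ pvFold pvPairs t := by
                apply pvSeqSplit pvPairs (fun kv h => h)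
                intro kv hkv p hp
                have hp0 : p = 0 := Nat.lt_one_iff.mp (by simpa using hp)
                subst hp0
                simpa using pvTry_none _ htry kv hkv
              have hno' : pvNoOv t := by
                have := pvNoOvDrop (c :: t) 1 hno
                simpa using this
              have hrec := ih t (by simp at hlen; omega) hno'
              rw [hscan, show (c :: t) = (c :: []) ++ t from rfl, hsplit, hrec]
              rfl
          | some kv =>
              obtain ⟨hmem, hpre⟩ := pvTry_some _ _ htry
              have hk1 : 1 ≤ kv.1.length := by
                have := pvKeysNe kv hmem
                cases h : kv.1 with
                | nil => exact absurd h this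
                | cons _ _ => simp [h]
              set b := List.drop kv.1.length (c :: t) with hb
              have hsb : (c :: t) = kv.1 ++ b := by
                have := List.prefix_iff_eq_take.mp (List.isPrefixOf_iff_prefix.mp hpre)
                conv_lhs => rw [← List.take_append_drop kv.1.length (c :: t), ← this]
              have hblen : b.length ≤ t.length := by
                simp [hb, List.length_drop]; omega
              -- split pvPairs around kv
              obtain ⟨P1, P2, hP⟩ := List.append_of_mem hmem
              have hnd := pvKeysNodup
              rw [hP, List.map_append, List.map_cons] at hnd
              have hnotP1 : kv.1 ∉ P1.map (·.1) := fun hmem' =>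
                (List.nodup_append.mp hnd).2.2 kv.1 hmem' kv.1 (by simp) rfl
              have hnotP2 : kv.1 ∉ P2.map (·.1) :=
                (List.nodup_cons.mp (List.nodup_append.mp hnd).2.1).1
              -- occurrences of other keys never start inside the kv.1-prefix
              have hBnd : ∀ kv' ∈ pvPairs, kv'.1 ≠ kv.1 → pvBnd kv'.1 kv.1 b := by
                intro kv' hkv' hne p hp hpre'
                rw [← hsb] at hpre'
                have h0 : kv.1.isPrefixOf (List.drop 0 (c :: t)) = true := by simpa using hpre
                have := hno kv' hkv' kv hmem hne p 0 hpre' h0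
                have hk'1 : 1 ≤ kv'.1.length := by
                  have := pvKeysNe kv' hkv'
                  cases h : kv'.1 with
                  | nil => exact absurd h this
                  | cons _ _ => simp [h]
                omega
              have hne1 : ∀ kv' ∈ P1, kv'.1 ≠ kv.1 := by
                intro kv' hkv' heq
                exact hnotP1 (heq ▸ List.mem_map_of_mem hkv')
              have hne2 : ∀ kv' ∈ P2, kv'.1 ≠ kv.1 := by
                intro kv' hkv' heq
                exact hnotP2 (heq ▸ List.mem_map_of_mem hkv')
              have hmem1 : ∀ kv' ∈ P1, kv' ∈ pvPairs := by
                intro kv' h'; rw [hP]; exact List.mem_append_left _ h'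
              have hmem2 : ∀ kv' ∈ P2, kv' ∈ pvPairs := by
                intro kv' h'; rw [hP]; simp [h']
              -- Step 1: passes before kv leave the kv.1-prefix alone
              have hstep1 : pvFold P1 (kv.1 ++ b) = kv.1 ++ pvFold P1 b :=
                pvSeqSplit P1 hmem1 kv.1 b
                  (fun kv' h' => hBnd kv' (hmem1 kv' h') (hne1 kv' h'))
              -- Step 2: kv's own pass replaces the front occurrence
              have hstep2 : pvRepSpec kv.1 kv.2 (kv.1 ++ pvFold P1 b).length (kv.1 ++ pvFold P1 b)
                  = kv.2 ++ pvRepSpec kv.1 kv.2 (pvFold P1 b).length (pvFold P1 b) := by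
                cases hk : kv.1 with
                | nil => exact absurd hk (pvKeysNe kv hmem)
                | cons k0 kt =>
                    have hlen' : ((k0 :: kt) ++ pvFold P1 b).length
                        = (kt ++ pvFold P1 b).length + 1 := by simp
                    rw [← hk]
                    have hpref : kv.1.isPrefixOf (kv.1 ++ pvFold P1 b) = true :=
                      List.isPrefixOf_iff_prefix.mpr (List.prefix_append _ _)
                    have hcons : kv.1 ++ pvFold P1 b = k0 :: (kt ++ pvFold P1 b) := by
                      rw [hk]; rfl
                    rw [hcons]
                    simp only [List.length_cons, pvRepSpec]
                    rw [← hcons, if_pos hpref, List.drop_append_of_le_length (le_refl _)]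
                    simp only [List.drop_length, List.nil_append]
                    congr 1
                    apply pvRepSpec_congr _ _ (pvKeysNe kv hmem)
                    · simp [hk]
                    · exact le_refl _
              -- Step 3: later passes leave the emitted value alone
              have hstep3 : ∀ Y, pvFold P2 (kv.2 ++ Y) = kv.2 ++ pvFold P2 Y := by
                intro Y
                apply pvSeqSplit P2 hmem2
                intro kv' h'
                exact pvBndVal kv'.1 kv.2 (pvKeysNoGt kv' (hmem2 kv' h')) (pvValsLast kv hmem)
                  (fun p hp => by
                    have := pvNoKeyInOtherVal kv hmem kv' (hmem2 kv' h')
                      (fun h => (hne2 kv' h') h.symm) p hp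
                    exact this) Y
              -- assemble
              have hfold : pvFold pvPairs (c :: t)
                  = kv.2 ++ pvFold pvPairs b := by
                rw [hsb, hP]
                simp only [pvFold, List.foldl_append, List.foldl_cons]
                rw [show List.foldl (fun l kv => pvRepSpec kv.1 kv.2 l.length l) (kv.1 ++ b) P1
                      = pvFold P1 (kv.1 ++ b) from rfl, hstep1, hstep2]
                rw [show List.foldl (fun l kv => pvRepSpec kv.1 kv.2 l.length l)
                      (kv.2 ++ pvRepSpec kv.1 kv.2 (pvFold P1 b).length (pvFold P1 b)) P2
                      = pvFold P2 (kv.2 ++ pvRepSpec kv.1 kv.2 (pvFold P1 b).length (pvFold P1 b)) from rfl,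
                  hstep3]
                congr 1
              have hnob : pvNoOv b := by
                have := pvNoOvDrop (c :: t) kv.1.length hno
                rwa [← hb] at this
              have hscan : pvScan (c :: t).length (c :: t) = kv.2 ++ pvScan b.length b := by
                simp only [List.length_cons, pvScan, htry]
                congr 1
                exact pvScan_congr t.length b.length b hblen (le_refl _)
              have hlen2 : t.length + 1 ≤ n + 1 := by simpa using hlen
              rw [hfold, hscan, ih b (by omega) hnob]

-- port A at char level
theorem pvPortA (link : String) :
    (format_link link).toList = pvFold pvPairs link.toList := by
  have hkeys : PySem.Dict.keys pvFieldDic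
      = ["ESTIMATOR_NAME", "MALSHAB_NAME", "%D7%90", "MALSHAB_SERIAL_NUMBER", "ESTIMATOR_MAIL"] := rfl
  have g1 : PySem.Dict.getD pvFieldDic "ESTIMATOR_NAME" "" = "<ESTIMATOR_NAME>" := rfl
  have g2 : PySem.Dict.getD pvFieldDic "MALSHAB_NAME" "" = "<MALSHAB_NAME>" := rfl
  have g3 : PySem.Dict.getD pvFieldDic "%D7%90" "" = "<TEAM_NUMBER>" := rfl
  have g4 : PySem.Dict.getD pvFieldDic "MALSHAB_SERIAL_NUMBER" "" = "<MALSHAB_SERIAL_NUMBER>" := rfl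
  have g5 : PySem.Dict.getD pvFieldDic "ESTIMATOR_MAIL" "" = "<ESTIMATOR_MAIL>" := rfl
  unfold format_link
  rw [hkeys]
  simp only [List.foldl, g1, g2, g3, g4, g5, pvFold, pvPairs]
  rw [PySem.Str.toList_replace]
  rw [PySem.Str.toList_replace]
  rw [PySem.Str.toList_replace]
  rw [PySem.Str.toList_replace]
  rw [PySem.Str.toList_replace]
  rw [pvReplaceEq _ _ _ (by decide), pvReplaceEq _ _ _ (by decide),
    pvReplaceEq _ _ _ (by decide), pvReplaceEq _ _ _ (by decide), pvReplaceEq _ _ _ (by decide)]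

-- ===== VERDICT (by name: the statement is the Claim_ definition above) =====
theorem format_link_spec : Claim_equal_format_link := by
  intro link _ hpre
  unfold Spec_format_link format_link_alt
  have h := pvMain link.toList.length link.toList (le_refl _) (pvPreNoOv link hpre)
  rw [← pvPortA link] at h
  calc format_link link = String.ofList (format_link link).toList := String.ofList_toList.symm
    _ = String.ofList (pvScan link.toList.length link.toList) := by rw [h]
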